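-- pv_equiv track=rewrite | github.com/BIT250/hash-table-implementation | reportsMaker.py | __generate_county_counts
-- ===== SOURCE A (Python) =====
-- def __generate_county_counts(cnps):
-- 	# Initialize dictionary to hold counts for each county
-- 	county_counts = {f"{i:02d}": 0 for i in range(1, 53)}  # County codes from 01 to 52
--
-- 	# Count occurrences for each county based on CNP
-- 	for cnp in cnps:
-- 		county_code = cnp[7:9]  # Extract the 8th and 9th digits
-- 		if county_code in county_counts:
-- 			county_counts[county_code] += 1
--
-- 	# Remove entries for counties with no counts
-- 	county_counts = {k: v for k, v in county_counts.items() if v > 0}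
--
-- 	return county_counts
-- ===== SOURCE B (Python) =====
-- def __generate_county_counts(cnps):
-- 	# Per-code counting scans: no counting dict/table at all.
-- 	result = {}
-- 	for i in range(1, 53):
-- 		code = f"{i:02d}"
-- 		n = sum(1 for cnp in cnps if cnp[7:9] == code)
-- 		if n > 0:
-- 			result[code] = n
-- 	return result
-- ===== Notes on version B (the rewrite author's own statement) =====
-- stated objective: alternative
-- what changed: B eliminates the counting dict entirely: for each of the 52 county codes it performs a direct counting scan of the input and records only non-zero counts, instead of A's single dict-update pass over a pre-seeded 52-entry table followed by a zero-pruning pass.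
import Mathlib
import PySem

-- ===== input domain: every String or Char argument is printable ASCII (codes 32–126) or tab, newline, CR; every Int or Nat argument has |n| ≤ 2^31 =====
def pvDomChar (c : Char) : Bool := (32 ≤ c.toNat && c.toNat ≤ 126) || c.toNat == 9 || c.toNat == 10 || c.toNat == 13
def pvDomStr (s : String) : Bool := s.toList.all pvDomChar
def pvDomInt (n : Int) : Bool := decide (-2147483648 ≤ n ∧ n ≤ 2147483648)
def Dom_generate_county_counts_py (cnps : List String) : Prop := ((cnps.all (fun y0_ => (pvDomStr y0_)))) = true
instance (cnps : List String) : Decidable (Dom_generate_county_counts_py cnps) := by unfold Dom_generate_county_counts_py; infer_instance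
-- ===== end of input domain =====

-- B: per-code counting scans (one direct count of the input for each of the 52 codes, inserting
-- only non-zero counts), instead of A's pre-seeded-table dict-update pass plus zero-pruning pass
-- (objective: alternative — no counting dict at all).


-- ===== PORT A =====
-- f"{i:02d}": two-digit zero-padded decimal; exact for 0 ≤ i < 100 (here i ∈ 1..52)
def pvFmt02 (i : Int) : String :=
  if i < 10 then String.ofList ('0' :: PySem.Int.toChars i) else PySem.Int.toStr i

-- cnp[7:9]
def pvCode (cnp : String) : String := PySem.Str.slice cnp (some 7) (some 9)

def generate_county_counts_py (cnps : List String) : List (String × Int) :=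
  -- county_counts = {f"{i:02d}": 0 for i in range(1, 53)}
  let d0 : PySem.Dict String Int :=
    (PySem.List.pyRange 1 53 1).foldl (fun d i => d.insert (pvFmt02 i) 0) PySem.Dict.empty
  -- for cnp in cnps: …  (county_counts[code] += 1 when code in county_counts)
  let d1 := cnps.foldl (fun d cnp =>
    let code := pvCode cnp
    if d.contains code then d.insert code (d.getD code 0 + 1) else d) d0
  -- {k: v for k, v in county_counts.items() if v > 0}  (keys distinct, so the dict is its item list)
  d1.items.filter (fun p => decide (0 < p.2))

-- ===== PORT B =====
def generate_county_counts_py_alt (cnps : List String) : List (String × Int) :=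
  -- result = {}; for i in range(1, 53): code = f"{i:02d}"; n = sum(1 for cnp in cnps if cnp[7:9] == code);
  --              if n > 0: result[code] = n
  let result : PySem.Dict String Int :=
    (PySem.List.pyRange 1 53 1).foldl (fun d i =>
      let code := pvFmt02 i
      let n : Int := (cnps.map (fun cnp => if pvCode cnp == code then (1 : Int) else 0)).sum
      if 0 < n then d.insert code n else d) PySem.Dict.empty
  -- return result  (keys distinct, so the dict is its item list)
  result.items

-- ===== PRECONDITION & SPEC =====
def Spec_generate_county_counts_py (cnps : List String) (out : List (String × Int)) : Prop := out = generate_county_counts_py_alt cnps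
instance (cnps : List String) (out : List (String × Int)) : Decidable (Spec_generate_county_counts_py cnps out) := by unfold Spec_generate_county_counts_py; infer_instance

-- ===== CLAIM (what is proved, stated in full; the proofs are below) =====
def Claim_equal_generate_county_counts_py : Prop := ∀ (cnps : List String), Dom_generate_county_counts_py cnps → Spec_generate_county_counts_py cnps (generate_county_counts_py cnps)

-- ===== LEMMAS AND PROOFS =====

-- the 52 county codes, in range order
def pvCodes : List String := (PySem.List.pyRange 1 53 1).map pvFmt02

lemma pvCodes_nodup : pvCodes.Nodup := by decide

-- A's loop never changes the key list
lemma pvKeys_loopA (cnps : List String) (d : PySem.Dict String Int) :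
    (cnps.foldl (fun d cnp =>
      let code := pvCode cnp
      if d.contains code then d.insert code (d.getD code 0 + 1) else d) d).keys = d.keys := by
  induction cnps generalizing d with
  | nil => rfl
  | cons c rest ih =>
    simp only [List.foldl_cons]
    by_cases hc : d.contains (pvCode c)
    · rw [if_pos hc, ih, PySem.Dict.keys_insert_of_contains d _ hc]
    · rw [if_neg hc, ih]

-- what A's loop does to each value
lemma pvGetD_loopA (cnps : List String) (d : PySem.Dict String Int) (k : String) :
    (cnps.foldl (fun d cnp =>
      let code := pvCode cnp
      if d.contains code then d.insert code (d.getD code 0 + 1) else d) d).getD k 0 =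
    d.getD k 0 + (if d.contains k then ((cnps.map pvCode).count k : Int) else 0) := by
  induction cnps generalizing d with
  | nil => simp
  | cons c rest ih =>
    simp only [List.foldl_cons, List.map_cons]
    by_cases hc : d.contains (pvCode c)
    · rw [if_pos hc, ih]
      by_cases hk : k = pvCode c
      · subst hk
        rw [PySem.Dict.getD_insert_self]
        rw [if_pos (PySem.Dict.contains_insert_self d (pvCode c) _), if_pos hc,
            List.count_cons_self]
        push_cast; ring
      · rw [PySem.Dict.getD_insert_of_ne _ _ _ hk]
        have hck : (d.insert (pvCode c) (d.getD (pvCode c) 0 + 1)).contains k = d.contains k := by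
          rw [PySem.Dict.contains_insert]
          have : (k == pvCode c) = false := by simpa using hk
          simp [this]
        rw [hck, List.count_cons_of_ne (fun h => hk h.symm)]
    · rw [if_neg hc, ih]
      by_cases hk : k = pvCode c
      · subst hk
        rw [if_neg hc, if_neg hc]
      · rw [List.count_cons_of_ne (fun h => hk h.symm)]

theorem generate_county_counts_py_spec : Claim_equal_generate_county_counts_py := by
  intro cnps _
  unfold Spec_generate_county_counts_py generate_county_counts_py generate_county_counts_py_alt
  -- name the count function
  set cnt : String → Nat := fun k => (cnps.map pvCode).count k with hcnt
  -- A's initial table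
  have hfresh : ∀ i ∈ PySem.List.pyRange 1 53 1,
      (PySem.Dict.empty : PySem.Dict String Int).contains (pvFmt02 i) = false := by
    intro i _; simp
  have hnd : ((PySem.List.pyRange 1 53 1).map pvFmt02).Nodup := pvCodes_nodup
  have h0items : ((PySem.List.pyRange 1 53 1).foldl
      (fun d i => d.insert (pvFmt02 i) 0) (PySem.Dict.empty : PySem.Dict String Int)).items =
      pvCodes.map (fun k => (k, (0 : Int))) := by
    rw [PySem.Dict.items_foldl_insert_fresh _ _ _ _ hfresh hnd]
    simp [pvCodes, List.map_map]; rfl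
  set d0 : PySem.Dict String Int :=
    (PySem.List.pyRange 1 53 1).foldl (fun d i => d.insert (pvFmt02 i) 0) PySem.Dict.empty with hd0
  have h0keys : d0.keys = pvCodes := by
    show d0.items.map (·.1) = pvCodes
    rw [h0items]; simp [List.map_map, Function.comp_def]
  have h0nodup : d0.keys.Nodup := by rw [h0keys]; exact pvCodes_nodup
  have h0getD : ∀ k ∈ pvCodes, d0.getD k 0 = 0 := by
    intro k hk
    have : (k, (0 : Int)) ∈ d0.items := by rw [h0items]; exact List.mem_map_of_mem hk
    exact PySem.Dict.getD_of_mem_items d0 this h0nodup 0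
  have h0contains : ∀ k ∈ pvCodes, d0.contains k = true := by
    intro k hk
    rw [PySem.Dict.contains_eq_decide_mem_keys, h0keys]
    simpa using hk
  -- A's final dict
  set d1 := cnps.foldl (fun d cnp =>
    let code := pvCode cnp
    if d.contains code then d.insert code (d.getD code 0 + 1) else d) d0 with hd1
  have hkeys1 : d1.keys = pvCodes := by rw [hd1, pvKeys_loopA, h0keys]
  have hnodup1 : d1.keys.Nodup := by rw [hkeys1]; exact pvCodes_nodup
  have hgetD1 : ∀ k ∈ pvCodes, d1.getD k 0 = (cnt k : Int) := by
    intro k hk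
    rw [hd1, pvGetD_loopA, h0getD k hk, if_pos (h0contains k hk)]
    simp [hcnt]
  -- A's result: A = the non-zero codes of pvCodes, each with its count
  have hA : d1.items.filter (fun p => decide (0 < p.2)) =
      (pvCodes.filter (fun k => decide (0 < (cnt k : Int)))).map (fun k => (k, (cnt k : Int))) := by
    have : d1.items = pvCodes.map (fun k => (k, (cnt k : Int))) := by
      rw [PySem.Dict.items_eq_map_keys d1 hnodup1 0, hkeys1]
      exact List.map_congr_left (fun k hk => by rw [hgetD1 k hk])
    rw [this, List.filter_map]
    rfl
  -- B's inner 0/1-sum is the count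
  have hsum : ∀ i : Int,
      (cnps.map (fun cnp => if pvCode cnp == pvFmt02 i then (1 : Int) else 0)).sum =
      (cnt (pvFmt02 i) : Int) := by
    intro i
    rw [PySem.List.sum_map_ite_one_zero]
    simp [hcnt, List.count_eq_countP, List.countP_map, Function.comp_def]
  -- B's loop: fold a conditional fresh-key insert = fold over the filtered range
  have hB : ((PySem.List.pyRange 1 53 1).foldl (fun d i =>
        let code := pvFmt02 i
        let n : Int := (cnps.map (fun cnp => if pvCode cnp == code then (1 : Int) else 0)).sum
        if 0 < n then d.insert code n else d) (PySem.Dict.empty : PySem.Dict String Int)).items =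
      (pvCodes.filter (fun k => decide (0 < (cnt k : Int)))).map (fun k => (k, (cnt k : Int))) := by
    have hstep : ((PySem.List.pyRange 1 53 1).foldl (fun d i =>
          let code := pvFmt02 i
          let n : Int := (cnps.map (fun cnp => if pvCode cnp == code then (1 : Int) else 0)).sum
          if 0 < n then d.insert code n else d) (PySem.Dict.empty : PySem.Dict String Int)) =
        (((PySem.List.pyRange 1 53 1).filter
            (fun i => decide (0 < (cnt (pvFmt02 i) : Int)))).foldl
          (fun d i => d.insert (pvFmt02 i) (cnt (pvFmt02 i) : Int)) PySem.Dict.empty) := by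
      rw [List.foldl_filter]
      simp only [hsum, decide_eq_true_eq]
    rw [hstep]
    have hndf : ((((PySem.List.pyRange 1 53 1).filter
        (fun i => decide (0 < (cnt (pvFmt02 i) : Int))))).map pvFmt02).Nodup := by
      have hsub : ((((PySem.List.pyRange 1 53 1).filter
          (fun i => decide (0 < (cnt (pvFmt02 i) : Int))))).map pvFmt02).Sublist pvCodes :=
        List.Sublist.map pvFmt02 List.filter_sublist
      exact pvCodes_nodup.sublist hsub
    rw [PySem.Dict.items_foldl_insert_fresh _ _ _ _ (fun i _ => by simp) hndf]
    rw [pvCodes, List.filter_map]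
    simp [Function.comp_def]
    decide
  rw [hA, hB]
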